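-- pv_equiv track=rewrite | github.com/mihiarc/xclim-timber | validation/validators/metadata_validator.py | _units_compatible
-- ===== SOURCE A (Python) =====
-- def _units_compatible(units1: str, units2: str) -> bool:
--     """
--     Check if two unit strings are compatible.
--
--     Args:
--         units1: First units string
--         units2: Second units string
--
--     Returns:
--         bool: True if units are likely compatible
--     """
--     # Normalize units for comparison
--     units1_norm = units1.lower().replace(' ', '').replace('_', '').replace('-', '')
--     units2_norm = units2.lower().replace(' ', '').replace('_', '').replace('-', '')
--
--     # Direct match
--     if units1_norm == units2_norm:
--         return True
--
--     # Common equivalencies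
--     equivalencies = [
--         {'celsius', '°c', 'degc', 'c'},
--         {'days', 'day', 'd'},
--         {'mm', 'millimeter', 'millimeters'},
--         {'mmd1', 'mm/d', 'mm/day', 'mmday1'},
--         {'degrees_north', 'degreesnorth', 'degreen', 'degrees_n'},
--         {'degrees_east', 'degreeseast', 'degreee', 'degrees_e'}
--     ]
--
--     for equiv_set in equivalencies:
--         if units1_norm in equiv_set and units2_norm in equiv_set:
--             return True
--
--     return False
-- ===== SOURCE B (Python) =====
-- # B: map each normalized string to a canonical representative and compare the
-- # representatives; normalization is a single character-filter pass instead of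
-- # three replace passes, and there is no per-call scan over equivalency sets.
-- _CANON = {
--     'celsius': 'celsius', '°c': 'celsius', 'degc': 'celsius', 'c': 'celsius',
--     'days': 'days', 'day': 'days', 'd': 'days',
--     'mm': 'mm', 'millimeter': 'mm', 'millimeters': 'mm',
--     'mmd1': 'mmd1', 'mm/d': 'mmd1', 'mm/day': 'mmd1', 'mmday1': 'mmd1',
--     'degrees_north': 'degreesnorth', 'degreesnorth': 'degreesnorth',
--     'degreen': 'degreesnorth', 'degrees_n': 'degreesnorth',
--     'degrees_east': 'degreeseast', 'degreeseast': 'degreeseast',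
--     'degreee': 'degreeseast', 'degrees_e': 'degreeseast',
-- }
--
--
-- def _canonical(u: str) -> str:
--     n = ''.join(ch for ch in u.lower() if ch not in ' _-')
--     return _CANON.get(n, n)
--
--
-- def _units_compatible(units1: str, units2: str) -> bool:
--     return _canonical(units1) == _canonical(units2)
-- ===== Notes on version B (the rewrite author's own statement) =====
-- stated objective: alternative
-- what changed: B replaces A's equality branch plus per-call loop over equivalency sets by a single canonicalization: each string is normalized in one character-filter pass (instead of three replace passes) and mapped through a precomputed token-to-representative dict, and the two representatives are compared for equality.
import Mathlib
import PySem

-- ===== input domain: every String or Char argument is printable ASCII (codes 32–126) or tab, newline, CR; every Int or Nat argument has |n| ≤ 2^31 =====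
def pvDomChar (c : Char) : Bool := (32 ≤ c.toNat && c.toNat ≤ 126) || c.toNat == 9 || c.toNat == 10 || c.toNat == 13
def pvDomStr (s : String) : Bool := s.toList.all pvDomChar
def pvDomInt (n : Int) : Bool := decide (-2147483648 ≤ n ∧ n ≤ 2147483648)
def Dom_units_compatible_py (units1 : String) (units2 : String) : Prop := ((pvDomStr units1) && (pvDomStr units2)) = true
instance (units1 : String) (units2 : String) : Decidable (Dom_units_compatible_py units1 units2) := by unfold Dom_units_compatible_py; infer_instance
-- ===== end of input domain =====

-- B maps each normalized string through a precomputed token->canonical-representative dict and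
-- compares the representatives (no per-call scan over equivalency sets, no separate equality
-- branch); normalization is one character-filter pass instead of three replace passes.


-- ===== PORT A =====
-- units.lower().replace(' ','').replace('_','').replace('-','')
def pvNormA (u : String) : String :=
  PySem.Str.replace (PySem.Str.replace (PySem.Str.replace (PySem.Str.lower u) " " "") "_" "") "-" ""

def pvEquivalencies : List (PySem.Set String) :=
  [ PySem.Set.ofList ["celsius", "°c", "degc", "c"],
    PySem.Set.ofList ["days", "day", "d"],
    PySem.Set.ofList ["mm", "millimeter", "millimeters"],
    PySem.Set.ofList ["mmd1", "mm/d", "mm/day", "mmday1"],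
    PySem.Set.ofList ["degrees_north", "degreesnorth", "degreen", "degrees_n"],
    PySem.Set.ofList ["degrees_east", "degreeseast", "degreee", "degrees_e"] ]

def units_compatible_py (units1 : String) (units2 : String) : Bool :=
  let units1_norm := pvNormA units1
  let units2_norm := pvNormA units2
  if units1_norm == units2_norm then true
  else
    -- for equiv_set in equivalencies: if n1 in equiv_set and n2 in equiv_set: return True / return False
    pvEquivalencies.any (fun s => PySem.Set.contains s units1_norm && PySem.Set.contains s units2_norm)

-- ===== PORT B =====
-- _CANON: flat token -> canonical representative dict, written out literally as in Source B
def pvCanonDict : PySem.Dict String String :=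
  PySem.Dict.ofList
    [ ("celsius", "celsius"), ("°c", "celsius"), ("degc", "celsius"), ("c", "celsius"),
      ("days", "days"), ("day", "days"), ("d", "days"),
      ("mm", "mm"), ("millimeter", "mm"), ("millimeters", "mm"),
      ("mmd1", "mmd1"), ("mm/d", "mmd1"), ("mm/day", "mmd1"), ("mmday1", "mmd1"),
      ("degrees_north", "degreesnorth"), ("degreesnorth", "degreesnorth"),
      ("degreen", "degreesnorth"), ("degrees_n", "degreesnorth"),
      ("degrees_east", "degreeseast"), ("degreeseast", "degreeseast"),
      ("degreee", "degreeseast"), ("degrees_e", "degreeseast") ]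

-- n = ''.join(ch for ch in u.lower() if ch not in ' _-'); return _CANON.get(n, n)
def pvCanonical (u : String) : String :=
  let n := String.ofList (((PySem.Str.lower u).toList).filter (fun ch => !((" _-".toList).contains ch)))
  PySem.Dict.getD pvCanonDict n n

def units_compatible_py_alt (units1 : String) (units2 : String) : Bool :=
  pvCanonical units1 == pvCanonical units2

-- ===== PRECONDITION & SPEC =====
def Spec_units_compatible_py (units1 : String) (units2 : String) (out : Bool) : Prop := out = units_compatible_py_alt units1 units2
instance (units1 : String) (units2 : String) (out : Bool) : Decidable (Spec_units_compatible_py units1 units2 out) := by unfold Spec_units_compatible_py; infer_instance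

-- ===== CLAIM (what is proved, stated in full; the proofs are below) =====
def Claim_equal_units_compatible_py : Prop := ∀ (units1 : String) (units2 : String), Dom_units_compatible_py units1 units2 → Spec_units_compatible_py units1 units2 (units_compatible_py units1 units2)

-- ===== LEMMAS AND PROOFS =====

-- ---- normalization: A's three replace passes equal B's single filter pass ----

theorem pv_go_single (c : Char) : ∀ (fuel : Nat) (l acc : List Char), l.length ≤ fuel →
    PySem.Chars.replace.go [c] [] fuel l acc = acc.reverse ++ l.filter (fun x => x != c) := by
  intro fuel
  induction fuel with
  | zero =>
    intro l acc h
    have : l = [] := List.eq_nil_of_length_eq_zero (Nat.le_zero.mp h)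
    subst this; simp [PySem.Chars.replace.go]
  | succ n ih =>
    intro l acc h
    cases l with
    | nil => simp [PySem.Chars.replace.go]
    | cons x t =>
      simp only [PySem.Chars.replace.go]
      by_cases hx : x = c
      · subst hx
        have hp : [x].isPrefixOf (x :: t) = true := by simp [List.isPrefixOf]
        simp [hp, ih t acc (by simpa using Nat.le_of_succ_le_succ h)]
      · have hp : [c].isPrefixOf (x :: t) = false := by
          simp [List.isPrefixOf]; exact fun h => absurd h.symm hx
        simp [hp, ih t (x :: acc) (by simpa using Nat.le_of_succ_le_succ h), hx]

theorem pv_replace_single (c : Char) (l : List Char) :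
    PySem.Chars.replace l [c] [] = l.filter (fun x => x != c) := by
  simp [PySem.Chars.replace, pv_go_single c l.length l [] le_rfl]

theorem pv_norm_eq (u : String) :
    pvNormA u = String.ofList (((PySem.Str.lower u).toList).filter (fun ch => !((" _-".toList).contains ch))) := by
  apply String.toList_inj.mp
  simp only [pvNormA, PySem.Str.toList_replace, String.toList_ofList]
  have h1 : (" " : String).toList = [' '] := rfl
  have h2 : ("_" : String).toList = ['_'] := rfl
  have h3 : ("-" : String).toList = ['-'] := rfl
  have h4 : ("" : String).toList = [] := rfl
  rw [h1, h2, h3, h4, pv_replace_single, pv_replace_single, pv_replace_single,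
    List.filter_filter, List.filter_filter]
  apply List.filter_congr
  intro ch _
  by_cases hs : ch = ' ' <;> by_cases hu : ch = '_' <;> by_cases hm : ch = '-' <;>
    simp [hs, hu, hm]

-- ---- the concrete group structure (representative, token list), proof-side only ----

def pvG : List (String × List String) :=
  [ ("celsius", ["celsius", "°c", "degc", "c"]),
    ("days", ["days", "day", "d"]),
    ("mm", ["mm", "millimeter", "millimeters"]),
    ("mmd1", ["mmd1", "mm/d", "mm/day", "mmday1"]),
    ("degreesnorth", ["degrees_north", "degreesnorth", "degreen", "degrees_n"]),
    ("degreeseast", ["degrees_east", "degreeseast", "degreee", "degrees_e"]) ]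

def pvKeys : List String := pvCanonDict.keys

def pvCanonOf (x : String) : String := PySem.Dict.getD pvCanonDict x x

-- concrete facts, all decidable on the literal lists
theorem pv_sets_eq : pvEquivalencies = pvG.map (·.2) := by decide

theorem pv_tok_key : ∀ p ∈ pvG, ∀ x ∈ p.2, x ∈ pvKeys := by decide

theorem pv_key_tok : ∀ x ∈ pvKeys, ∃ p ∈ pvG, x ∈ p.2 := by decide

theorem pv_canon_mem : ∀ p ∈ pvG, ∀ x ∈ p.2, pvCanonOf x = p.1 := by decide

theorem pv_rep_key : ∀ p ∈ pvG, p.1 ∈ pvKeys := by decide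

theorem pv_rep_inj : ∀ p ∈ pvG, ∀ q ∈ pvG, p.1 = q.1 → p = q := by decide

theorem pv_disj : ∀ p ∈ pvG, ∀ q ∈ pvG, ∀ x, x ∈ p.2 → x ∈ q.2 → p = q := by decide

theorem pv_canon_self (x : String) (hx : x ∉ pvKeys) : pvCanonOf x = x := by
  unfold pvCanonOf
  have hc : pvCanonDict.contains x = false := by
    by_contra h
    exact hx ((PySem.Dict.contains_iff_mem_keys pvCanonDict x).mp (by simpa using h))
  have : pvCanonDict.get? x = none := (PySem.Dict.get?_eq_none_iff_contains pvCanonDict x).mpr hc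
  show (pvCanonDict.get? x).getD x = x
  rw [this]; rfl

theorem pv_canon_key (x : String) (hx : x ∈ pvKeys) : pvCanonOf x ∈ pvKeys := by
  obtain ⟨p, hp, hxp⟩ := pv_key_tok x hx
  rw [pv_canon_mem p hp x hxp]
  exact pv_rep_key p hp

-- A's scan on a non-token is always false
theorem pv_scan_false_left (x y : String) (hx : x ∉ pvKeys) :
    pvEquivalencies.any (fun s => PySem.Set.contains s x && PySem.Set.contains s y) = false := by
  rw [pv_sets_eq, List.any_eq_false]
  intro s hs
  obtain ⟨p, hp, rfl⟩ := List.mem_map.mp hs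
  have : x ∉ p.2 := fun h => hx (pv_tok_key p hp x h)
  simp [PySem.Set.contains, this]

-- the core: A's equality-or-scan equals B's canonical-representative comparison
theorem pv_core (x y : String) :
    (if x == y then true
     else pvEquivalencies.any (fun s => PySem.Set.contains s x && PySem.Set.contains s y))
      = (pvCanonOf x == pvCanonOf y) := by
  by_cases hx : x ∈ pvKeys
  · obtain ⟨p, hp, hxp⟩ := pv_key_tok x hx
    rw [pv_canon_mem p hp x hxp]
    by_cases hy : y ∈ p.2
    · -- same group: both sides true
      rw [pv_canon_mem p hp y hy]
      have hscan : pvEquivalencies.any (fun s => PySem.Set.contains s x && PySem.Set.contains s y) = true := by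
        rw [pv_sets_eq, List.any_eq_true]
        exact ⟨p.2, List.mem_map.mpr ⟨p, hp, rfl⟩, by simp [PySem.Set.contains, hxp, hy]⟩
      by_cases hxy : x = y
      · simp [hxy]
      · rw [if_neg (by simp [hxy]), hscan]; simp
    · -- y not in x's group
      have hxy : (x == y) = false := by
        simp only [beq_eq_false_iff_ne]; intro h; exact hy (h ▸ hxp)
      have hscan : pvEquivalencies.any (fun s => PySem.Set.contains s x && PySem.Set.contains s y) = false := by
        rw [pv_sets_eq, List.any_eq_false]
        intro s hs
        obtain ⟨q, hq, rfl⟩ := List.mem_map.mp hs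
        by_cases hxq : x ∈ q.2
        · have := pv_disj q hq p hp x hxq hxp
          subst this
          simp [PySem.Set.contains, hy]
        · simp [PySem.Set.contains, hxq]
      rw [hxy, if_neg (by simp), hscan]
      by_cases hyk : y ∈ pvKeys
      · obtain ⟨q, hq, hyq⟩ := pv_key_tok y hyk
        rw [pv_canon_mem q hq y hyq]
        have hne : p.1 ≠ q.1 := by
          intro h
          have := pv_rep_inj p hp q hq h
          exact hy (this ▸ hyq)
        simp [hne]
      · rw [pv_canon_self y hyk]
        have : p.1 ≠ y := fun h => hyk (h ▸ pv_rep_key p hp)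
        simp [this]
  · -- x is not a token: scan is false on both orders, canon x = x
    rw [pv_canon_self x hx, pv_scan_false_left x y hx]
    by_cases hyk : y ∈ pvKeys
    · have h1 : (x == y) = false := by
        simp only [beq_eq_false_iff_ne]; intro h; exact hx (h ▸ hyk)
      have h2 : (x == pvCanonOf y) = false := by
        simp only [beq_eq_false_iff_ne]; intro h; exact hx (h ▸ pv_canon_key y hyk)
      rw [h1, if_neg (by simp), h2]
    · rw [pv_canon_self y hyk]
      by_cases hxy : x = y <;> simp [hxy]

-- ===== VERDICT (by name: the statement is the Claim_ definition above) =====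
theorem units_compatible_py_spec : Claim_equal_units_compatible_py := by
  intro u1 u2 _
  show units_compatible_py u1 u2 = units_compatible_py_alt u1 u2
  simp only [units_compatible_py, units_compatible_py_alt, pvCanonical]
  rw [← pv_norm_eq u1, ← pv_norm_eq u2]
  exact pv_core (pvNormA u1) (pvNormA u2)
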